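-- pv_equiv track=rewrite | github.com/Ji-Hwan-Jung/coding-test | level2/할인 행사.py | solution
-- ===== SOURCE A (Python) =====
-- def solution(want, number, discount):
--     answer = 0
--
--     for i in range(len(discount)-9):
--         wants = {k: v for k,v in zip(want,number)}
--         arr = discount[i:i+10]
--         d = {i: arr.count(i) for i in set(arr)}
--         for k in wants.keys():
--             if k in d.keys():
--                 wants[k] -= d[k]
--
--         if len(list(filter(lambda x: wants[x] > 0, wants))) == 0:
--             answer += 1
--
--     return answer
-- ===== SOURCE B (Python) =====
-- def _prefix_counts(k, discount):
--     p = [0]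
--     for x in discount:
--         p.append(p[-1] + (1 if x == k else 0))
--     return p
--
--
-- def solution(want, number, discount):
--     req = dict(zip(want, number))
--     pref = {k: _prefix_counts(k, discount) for k in req}
--     answer = 0
--     for i in range(len(discount) - 9):
--         if all(pref[k][i + 10] - pref[k][i] >= v for k, v in req.items()):
--             answer += 1
--     return answer
-- ===== Notes on version B (the rewrite author's own statement) =====
-- stated objective: faster
-- what changed: Per-window slice/count-dict rebuilding is replaced by one prefix-count table per wanted item built once, so each window check is a constant number of prefix-count differences per key.
import Mathlib
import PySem

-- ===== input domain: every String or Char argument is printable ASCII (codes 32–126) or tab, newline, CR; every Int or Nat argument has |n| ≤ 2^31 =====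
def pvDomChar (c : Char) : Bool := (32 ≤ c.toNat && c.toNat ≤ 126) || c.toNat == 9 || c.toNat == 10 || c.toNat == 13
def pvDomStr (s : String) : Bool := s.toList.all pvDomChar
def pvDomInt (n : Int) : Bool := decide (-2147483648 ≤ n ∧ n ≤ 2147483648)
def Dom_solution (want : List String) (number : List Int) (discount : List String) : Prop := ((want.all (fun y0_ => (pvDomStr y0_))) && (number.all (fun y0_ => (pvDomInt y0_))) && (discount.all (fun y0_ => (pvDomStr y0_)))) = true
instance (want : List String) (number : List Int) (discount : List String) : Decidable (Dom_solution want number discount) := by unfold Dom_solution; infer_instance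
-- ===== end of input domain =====

-- B recomputes nothing per window: one prefix-count table per wanted item replaces A's
-- per-window slice/dict rebuild; equal return value on all inputs (both are total).

-- ===== PORT A =====
-- wants = {k: v for k, v in zip(want, number)}
def mkWants (want : List String) (number : List Int) : PySem.Dict String Int :=
  (want.zip number).foldl (fun d p => d.insert p.1 p.2) PySem.Dict.empty

def solution (want : List String) (number : List Int) (discount : List String) : Int :=
  (PySem.List.pyRange 0 ((discount.length : Int) - 9) 1).foldl
    (fun answer i =>
      let wants := mkWants want number
      let arr := PySem.List.slice discount (some i) (some (i + 10))
      -- d = {x: arr.count(x) for x in set(arr)}  (only looked up afterwards)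
      let d := (PySem.Set.ofList arr).foldl
        (fun dd x => dd.insert x ((PySem.List.count arr x : Int))) PySem.Dict.empty
      -- for k in wants.keys(): if k in d.keys(): wants[k] -= d[k]
      let wants2 := wants.keys.foldl
        (fun w k => if d.contains k then w.insert k (w.getD k 0 - d.getD k 0) else w) wants
      if (wants2.keys.filter (fun x => decide (0 < wants2.getD x 0))).length = 0
      then answer + 1 else answer)
    0

-- ===== PORT B =====
-- p = [0]; c = 0; for x in discount: c += (x == k); p.append(c)
def prefCounts (k : String) (discount : List String) : List Int :=
  (discount.foldl (fun pc x =>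
      let c := pc.2 + (if x == k then (1 : Int) else 0)
      (pc.1 ++ [c], c)) ([0], 0)).1

def solution_alt (want : List String) (number : List Int) (discount : List String) : Int :=
  let req := (want.zip number).foldl (fun d p => d.insert p.1 p.2) PySem.Dict.empty
  let pref := req.keys.foldl (fun d k => d.insert k (prefCounts k discount)) PySem.Dict.empty
  (PySem.List.pyRange 0 ((discount.length : Int) - 9) 1).foldl
    (fun answer i =>
      if req.items.all (fun p =>
          decide (PySem.List.pyGetD (pref.getD p.1 []) (i + 10) 0
                  - PySem.List.pyGetD (pref.getD p.1 []) i 0 ≥ p.2))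
      then answer + 1 else answer)
    0

-- ===== PRECONDITION & SPEC =====
def Spec_solution (want : List String) (number : List Int) (discount : List String) (out : Int) : Prop := out = solution_alt want number discount
instance (want : List String) (number : List Int) (discount : List String) (out : Int) : Decidable (Spec_solution want number discount out) := by unfold Spec_solution; infer_instance

-- ===== CLAIM (what is proved, stated in full; the proofs are below) =====
def Claim_equal_solution : Prop := ∀ (want : List String) (number : List Int) (discount : List String), Dom_solution want number discount → Spec_solution want number discount (solution want number discount)

-- ===== LEMMAS AND PROOFS =====

-- B's prefix-count list is the table of counts of k in prefixes of discount
lemma prefFold (k : String) (xs : List String) :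
    xs.foldl (fun pc x =>
        let c := pc.2 + (if x == k then (1 : Int) else 0)
        (pc.1 ++ [c], c)) (([0] : List Int), (0 : Int))
      = ((List.range (xs.length + 1)).map (fun j => (((xs.take j).count k : Nat) : Int)),
         ((xs.count k : Nat) : Int)) := by
  induction xs using List.reverseRecOn with
  | nil => simp
  | append_singleton xs x ih =>
      rw [List.foldl_append, ih]
      simp only [List.foldl_cons, List.foldl_nil]
      have hcnt : (((xs ++ [x]).count k : Nat) : Int)
          = ((xs.count k : Nat) : Int) + (if x == k then (1 : Int) else 0) := by
        rw [List.count_append, List.count_singleton']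
        by_cases h : x == k <;> simp [beq_iff_eq.mp, h] <;> simp_all
      have hmap : (List.range ((xs ++ [x]).length + 1)).map
            (fun j => ((((xs ++ [x]).take j).count k : Nat) : Int))
          = (List.range (xs.length + 1)).map (fun j => (((xs.take j).count k : Nat) : Int))
            ++ [(((xs ++ [x]).count k : Nat) : Int)] := by
        rw [List.length_append, List.length_singleton, List.range_succ, List.map_append]
        congr 1
        · apply List.map_congr_left
          intro j hj
          rw [List.take_append_of_le_length (Nat.lt_succ_iff.mp (List.mem_range.mp hj))]
        · simp [List.take_append, List.count_append, List.take_of_length_le (Nat.le_succ _)]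
      rw [hmap, hcnt]

lemma prefCounts_eq (k : String) (xs : List String) :
    prefCounts k xs
      = (List.range (xs.length + 1)).map (fun j => (((xs.take j).count k : Nat) : Int)) := by
  unfold prefCounts; rw [prefFold]

lemma pref_getD (k : String) (discount : List String) (j : Int) (h0 : 0 ≤ j)
    (hj : j.toNat ≤ discount.length) :
    PySem.List.pyGetD (prefCounts k discount) j 0
      = (((discount.take j.toNat).count k : Nat) : Int) := by
  have h : j = ((j.toNat : Nat) : Int) := (Int.toNat_of_nonneg h0).symm
  rw [h, PySem.List.pyGetD_natCast, prefCounts_eq]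
  rw [List.getD_eq_getElem?_getD, List.getElem?_map, List.getElem?_range (by omega)]
  simp only [Option.map_some, Option.getD_some]
  congr 1

-- the window slice count as a difference of prefix counts
lemma slice_count (discount : List String) (k : String) (i : Int) (h0 : 0 ≤ i) :
    (((PySem.List.slice discount (some i) (some (i + 10))).count k : Nat) : Int)
      = (((discount.take ((i + 10).toNat)).count k : Nat) : Int)
        - (((discount.take i.toNat).count k : Nat) : Int) := by
  rw [PySem.List.slice_toNat _ h0 (by omega)]
  have h1 : (i + 10).toNat = i.toNat + 10 := by omega
  rw [h1, List.take_add, List.count_append]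
  have h2 : i.toNat + 10 - i.toNat = 10 := by omega
  rw [h2]
  push_cast
  ring

-- A's per-window count dict: keys and lookups
lemma countD_keys (arr : List String) :
    ((PySem.Set.ofList arr).foldl
        (fun dd x => dd.insert x ((PySem.List.count arr x : Int))) PySem.Dict.empty).keys
      = PySem.Set.ofList arr := by
  rw [PySem.Dict.keys_foldl_insert]
  simp [PySem.Dict.keys_empty, PySem.Set.update_nil_left, PySem.Set.ofList_ofList]

lemma countD_getD (arr : List String) (k : String) (hk : k ∈ arr) :
    ((PySem.Set.ofList arr).foldl
        (fun dd x => dd.insert x ((PySem.List.count arr x : Int))) PySem.Dict.empty).getD k 0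
      = ((arr.count k : Nat) : Int) := by
  have hitems := PySem.Dict.items_foldl_insert_fresh (l := PySem.Set.ofList arr)
    (k := fun a => a) (v := fun a => ((PySem.List.count arr a : Int)))
    (d := PySem.Dict.empty) (by intro a _; exact PySem.Dict.contains_empty a)
    (by simp [PySem.Set.nodup_ofList])
  apply PySem.Dict.getD_of_mem_items
  · rw [hitems]
    simp only [PySem.Dict.empty, List.nil_append]
    refine List.mem_map.mpr ⟨k, ?_, ?_⟩
    · exact (PySem.Set.mem_ofList arr k).mpr hk
    · simp [PySem.List.count_eq]
  · rw [PySem.Dict.keys_foldl_insert]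
    simp [PySem.Set.update_nil_left, PySem.Set.ofList_ofList, PySem.Set.nodup_ofList]

-- A's subtraction loop over the keys of wants
lemma subFold (dct : PySem.Dict String Int) (ks : List String) :
    ∀ (w : PySem.Dict String Int), ks.Nodup → (∀ k ∈ ks, w.contains k = true) →
      (ks.foldl (fun w k => if dct.contains k then w.insert k (w.getD k 0 - dct.getD k 0) else w) w).keys = w.keys
      ∧ ∀ k', (ks.foldl (fun w k => if dct.contains k then w.insert k (w.getD k 0 - dct.getD k 0) else w) w).getD k' 0
          = if k' ∈ ks ∧ dct.contains k' = true then w.getD k' 0 - dct.getD k' 0 else w.getD k' 0 := by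
  induction ks with
  | nil => intro w _ _; simp
  | cons k ks ih =>
      intro w hnd hc
      have hkw : w.contains k = true := hc k (List.mem_cons_self)
      have hnd' : ks.Nodup := hnd.of_cons
      have hknks : k ∉ ks := (List.nodup_cons.mp hnd).1
      set w' : PySem.Dict String Int :=
        if dct.contains k then w.insert k (w.getD k 0 - dct.getD k 0) else w with hw'
      have hkeys' : w'.keys = w.keys := by
        rw [hw']; split
        · exact PySem.Dict.keys_insert_of_contains _ _ hkw
        · rfl
      have hc' : ∀ k'' ∈ ks, w'.contains k'' = true := by
        intro k'' hk''
        rw [hw']; split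
        · rw [PySem.Dict.contains_insert]
          simp [hc k'' (List.mem_cons_of_mem _ hk'')]
        · exact hc k'' (List.mem_cons_of_mem _ hk'')
      obtain ⟨ihk, ihg⟩ := ih w' hnd' hc'
      have hfold : (k :: ks).foldl (fun w k => if dct.contains k then w.insert k (w.getD k 0 - dct.getD k 0) else w) w
          = ks.foldl (fun w k => if dct.contains k then w.insert k (w.getD k 0 - dct.getD k 0) else w) w' := by
        rw [List.foldl_cons]
      refine ⟨by rw [hfold, ihk, hkeys'], ?_⟩
      intro k'
      rw [hfold, ihg k']
      by_cases hkk : k' = k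
      · subst hkk
        have : ¬ (k' ∈ ks ∧ dct.contains k' = true) := fun h => hknks h.1
        rw [if_neg this]
        simp only [List.mem_cons, true_or, true_and]
        rw [hw']
        by_cases hd : dct.contains k' = true
        · rw [if_pos hd, if_pos hd, PySem.Dict.getD_insert_self]
        · rw [if_neg hd, if_neg (by simpa using hd)]
      · have hgw : w'.getD k' 0 = w.getD k' 0 := by
          rw [hw']; split
          · exact PySem.Dict.getD_insert_of_ne _ _ _ hkk
          · rfl
        rw [hgw]
        by_cases hm : k' ∈ ks ∧ dct.contains k' = true
        · rw [if_pos hm, if_pos ⟨List.mem_cons_of_mem _ hm.1, hm.2⟩]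
        · rw [if_neg hm, if_neg (by
            rintro ⟨hmem, hd⟩
            rcases List.mem_cons.mp hmem with h | h
            · exact hkk h
            · exact hm ⟨h, hd⟩)]

-- B's dict of prefix tables: lookup at a required key
lemma prefDict_getD (ks : List String) (discount : List String) (hnd : ks.Nodup) (k : String)
    (hk : k ∈ ks) :
    (ks.foldl (fun d k => d.insert k (prefCounts k discount)) PySem.Dict.empty).getD k []
      = prefCounts k discount := by
  have hitems := PySem.Dict.items_foldl_insert_fresh (l := ks)
    (k := fun a => a) (v := fun a => prefCounts a discount)
    (d := PySem.Dict.empty) (by intro a _; exact PySem.Dict.contains_empty a)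
    (by simp [hnd])
  apply PySem.Dict.getD_of_mem_items
  · rw [hitems]
    simp only [PySem.Dict.empty, List.nil_append]
    exact List.mem_map.mpr ⟨k, hk, rfl⟩
  · rw [PySem.Dict.keys_foldl_insert]
    simpa [PySem.Set.update_nil_left] using (PySem.Set.ofList_eq_self_of_nodup hnd ▸ hnd)

-- ===== VERDICT (by name: the statement is the Claim_ definition above) =====
theorem solution_spec : Claim_equal_solution := by
  intro want number discount _
  unfold Spec_solution solution solution_alt mkWants
  apply PySem.List.foldl_congr_mem
  intro acc i hi
  obtain ⟨h0, h1⟩ := PySem.List.mem_pyRange_one.mp hi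
  dsimp only
  set W := (want.zip number).foldl (fun d p => d.insert p.1 p.2) PySem.Dict.empty with hW
  set arr := PySem.List.slice discount (some i) (some (i + 10)) with harr
  set dct := (PySem.Set.ofList arr).foldl
      (fun dd x => dd.insert x ((PySem.List.count arr x : Int))) PySem.Dict.empty with hdct
  have hWnd : W.keys.Nodup := by
    apply PySem.Dict.nodup_keys_foldl_insert_key
    simp [PySem.Dict.keys_empty]
  obtain ⟨hk2, hg2⟩ := subFold dct W.keys W hWnd
    (fun k hk => (PySem.Dict.contains_iff_mem_keys W k).mpr hk)
  have hcontains : ∀ k, dct.contains k = true ↔ k ∈ arr := by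
    intro k
    rw [PySem.Dict.contains_iff_mem_keys, hdct, countD_keys]
    exact PySem.Set.mem_ofList arr k
  have cval : ∀ k ∈ W.keys,
      (W.keys.foldl (fun w k => if dct.contains k then w.insert k (w.getD k 0 - dct.getD k 0) else w) W).getD k 0
        = W.getD k 0 - ((arr.count k : Nat) : Int) := by
    intro k hk
    rw [hg2 k]
    by_cases hm : k ∈ arr
    · rw [if_pos ⟨hk, (hcontains k).mpr hm⟩, hdct, countD_getD arr k hm]
    · rw [if_neg (fun h => hm ((hcontains k).mp h.2))]
      have hz : arr.count k = 0 := by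
        simp [List.count_eq_zero, hm]
      rw [hz]
      simp
  have hidx1 : i.toNat ≤ discount.length := by omega
  have hidx2 : (i + 10).toNat ≤ discount.length := by omega
  have hBterm : ∀ k ∈ W.keys,
      PySem.List.pyGetD ((W.keys.foldl (fun d k => d.insert k (prefCounts k discount)) PySem.Dict.empty).getD k []) (i + 10) 0
        - PySem.List.pyGetD ((W.keys.foldl (fun d k => d.insert k (prefCounts k discount)) PySem.Dict.empty).getD k []) i 0
      = ((arr.count k : Nat) : Int) := by
    intro k hk
    rw [prefDict_getD W.keys discount hWnd k hk,
        pref_getD k discount (i + 10) (by omega) hidx2,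
        pref_getD k discount i h0 hidx1]
    exact (slice_count discount k i h0).symm
  have hiff :
      (((W.keys.foldl (fun w k => if dct.contains k then w.insert k (w.getD k 0 - dct.getD k 0) else w) W).keys.filter
          (fun x => decide (0 < (W.keys.foldl (fun w k => if dct.contains k then w.insert k (w.getD k 0 - dct.getD k 0) else w) W).getD x 0))).length = 0)
      ↔ (W.items.all (fun p =>
          decide (PySem.List.pyGetD ((W.keys.foldl (fun d k => d.insert k (prefCounts k discount)) PySem.Dict.empty).getD p.1 []) (i + 10) 0
                  - PySem.List.pyGetD ((W.keys.foldl (fun d k => d.insert k (prefCounts k discount)) PySem.Dict.empty).getD p.1 []) i 0 ≥ p.2)) = true) := by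
    rw [hk2, List.length_eq_zero_iff, List.filter_eq_nil_iff, List.all_eq_true,
        PySem.Dict.items_eq_map_keys W hWnd 0]
    simp only [List.forall_mem_map]
    refine ⟨fun h k hk => ?_, fun h k hk => ?_⟩
    · have h1' := h k hk
      rw [cval k hk] at h1'
      have h2' := hBterm k hk
      simp only [decide_eq_true_eq] at h1' ⊢
      rw [h2']
      omega
    · have h1' := h k hk
      simp only [decide_eq_true_eq] at h1' ⊢
      rw [hBterm k hk] at h1'
      rw [cval k hk]
      omega
  exact if_congr hiff rfl rfl
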